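-- pv_equiv track=rewrite | github.com/WojciechNiespielak/mtgAnalizer | decks/validator.py | validate_deck
-- ===== SOURCE A (Python) =====
-- def validate_deck(commander, deck):
--     if not commander:
--         return "Brak Commandera w pliku."
--
--     if len(deck) != 99:
--         return "Talia musi zawierać 99 kart (bez Commandera)."
--
--     card_counts = {}
--     for card in deck:
--         card_counts[card["name"]] = card_counts.get(card["name"], 0) + 1
--
--     for name, count in card_counts.items():
--         is_basic_land = False
--         for card in deck:
--             if card["name"] == name and "Basic Land" in card.get("type_line", ""):
--                 is_basic_land = True
--                 break
--         if count > 1 and not is_basic_land: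
--             return f"Karta {name} występuje więcej niż raz (z wyjątkiem Basic Lands)."
--
--     return None
-- ===== SOURCE B (Python) =====
-- def validate_deck(commander, deck):
--     if not commander:
--         return "Brak Commandera w pliku."
--
--     if len(deck) != 99:
--         return "Talia musi zawierać 99 kart (bez Commandera)."
--
--     # one pass: name -> [count, seen a Basic Land printing of this name]
--     info = {}
--     for card in deck:
--         name = card["name"]
--         cnt, basic = info.get(name, (0, False))
--         info[name] = (cnt + 1, basic or "Basic Land" in card.get("type_line", ""))
--
--     for name, (cnt, basic) in info.items():
--         if cnt > 1 and not basic: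
--             return f"Karta {name} występuje więcej niż raz (z wyjątkiem Basic Lands)."
--
--     return None
-- ===== Notes on version B (the rewrite author's own statement) =====
-- stated objective: simpler
-- what changed: A rescans the whole deck for each distinct name to decide the basic-land flag; B builds a single dict name -> (count, basic-land flag) in one pass over the deck and then checks each entry once, removing the inner rescan.
import Mathlib
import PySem

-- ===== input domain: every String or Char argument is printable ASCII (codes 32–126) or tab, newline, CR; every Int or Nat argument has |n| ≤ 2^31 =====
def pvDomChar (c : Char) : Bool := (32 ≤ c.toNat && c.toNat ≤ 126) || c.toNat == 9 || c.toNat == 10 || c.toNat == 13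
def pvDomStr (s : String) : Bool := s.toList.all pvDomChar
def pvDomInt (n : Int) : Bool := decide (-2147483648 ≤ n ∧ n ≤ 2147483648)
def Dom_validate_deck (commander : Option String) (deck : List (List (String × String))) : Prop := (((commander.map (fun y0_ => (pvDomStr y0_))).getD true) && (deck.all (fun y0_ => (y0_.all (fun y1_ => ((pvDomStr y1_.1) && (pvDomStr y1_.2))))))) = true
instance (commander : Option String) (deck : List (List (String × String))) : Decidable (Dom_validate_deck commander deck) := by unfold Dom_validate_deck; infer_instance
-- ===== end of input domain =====

-- B replaces A's per-name rescan of the deck by one dict pass (name -> count × basic-land flag)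
-- followed by a single check pass; equivalence of return values is proved on Pre_ (no KeyError).

-- ===== PORT A =====
-- card.get(k, dflt) on a dict given as an association list (first match)
def pvGet (card : List (String × String)) (k dflt : String) : String :=
  ((card.find? (fun p => p.1 == k)).map Prod.snd).getD dflt

-- card["name"]; Pre_ guarantees the key is present where A reaches this access
def pvName (card : List (String × String)) : String := pvGet card "name" ""

-- "Basic Land" in card.get("type_line", "")
def pvBasic (card : List (String × String)) : Bool :=
  PySem.Str.isIn "Basic Land" (pvGet card "type_line" "")

def pvMsgDup (n : String) : String :=
  "Karta " ++ n ++ " występuje więcej niż raz (z wyjątkiem Basic Lands)."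

-- A's second loop: for each (name, count) rescan deck (with break) for a basic-land printing
def pvScanA (deck : List (List (String × String))) : List (String × Int) → Option String
  | [] => none
  | (name, count) :: rest =>
    let isBasic := deck.any (fun card => pvName card == name && pvBasic card)
    if 1 < count ∧ isBasic = false then some (pvMsgDup name) else pvScanA deck rest

def validate_deck (commander : Option String) (deck : List (List (String × String))) : Option String :=
  if (match commander with | none => true | some s => s == "") then some "Brak Commandera w pliku."
  else if deck.length ≠ 99 then some "Talia musi zawierać 99 kart (bez Commandera)."
  else
    let card_counts : PySem.Dict String Int :=
      deck.foldl (fun d card => d.insert (pvName card) (d.getD (pvName card) 0 + 1)) PySem.Dict.empty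
    pvScanA deck card_counts.items

-- ===== PORT B =====
def pvBuildB (deck : List (List (String × String))) : PySem.Dict String (Int × Bool) :=
  deck.foldl (fun d card =>
    let p := d.getD (pvName card) (0, false)
    d.insert (pvName card) (p.1 + 1, p.2 || pvBasic card)) PySem.Dict.empty

def pvScanB : List (String × (Int × Bool)) → Option String
  | [] => none
  | (name, p) :: rest =>
    if 1 < p.1 ∧ p.2 = false then some (pvMsgDup name) else pvScanB rest

def validate_deck_alt (commander : Option String) (deck : List (List (String × String))) : Option String :=
  if (match commander with | none => true | some s => s == "") then some "Brak Commandera w pliku."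
  else if deck.length ≠ 99 then some "Talia musi zawierać 99 kart (bez Commandera)."
  else pvScanB (pvBuildB deck).items

-- ===== PRECONDITION & SPEC =====
-- Pre_ excludes only inputs on which A raises KeyError: a truthy commander with a 99-card deck
-- in which some card lacks the "name" key.
def Pre_validate_deck (commander : Option String) (deck : List (List (String × String))) : Prop :=
  ((match commander with | none => true | some s => s == "") = false ∧ deck.length = 99) →
    ∀ card ∈ deck, card.any (fun p => p.1 == "name")
instance (commander : Option String) (deck : List (List (String × String))) : Decidable (Pre_validate_deck commander deck) := by unfold Pre_validate_deck; infer_instance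

def pvWitness_validate_deck : Option String × (List (List (String × String))) := (some "Cmdr", [])

def Spec_validate_deck (commander : Option String) (deck : List (List (String × String))) (out : Option String) : Prop := out = validate_deck_alt commander deck
instance (commander : Option String) (deck : List (List (String × String))) (out : Option String) : Decidable (Spec_validate_deck commander deck out) := by unfold Spec_validate_deck; infer_instance

-- ===== CLAIM (what is proved, stated in full; the proofs are below) =====
def Claim_equal_validate_deck : Prop := ∀ (commander : Option String) (deck : List (List (String × String))), Dom_validate_deck commander deck → Pre_validate_deck commander deck → Spec_validate_deck commander deck (validate_deck commander deck)

-- ===== LEMMAS AND PROOFS =====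

theorem pv_any_beq (l : List String) (n : String) :
    (l.any fun x => x == n) = decide (n ∈ l) := by
  induction l with
  | nil => simp
  | cons a t ih =>
    simp only [List.any_cons, ih, List.mem_cons]
    by_cases h : n = a
    · subst h; simp
    · have h1 : (a == n) = false := beq_eq_false_iff_ne.mpr (fun hh => h hh.symm)
      simp [h1, h]

theorem pv_find?_beq_mem {l : List String} {n : String} (h : n ∈ l) :
    l.find? (fun x => x == n) = some n := by
  induction l with
  | nil => cases h
  | cons a t ih =>
    rw [List.mem_cons] at h
    rcases h with rfl | h
    · simp
    · by_cases ha : a = n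
      · subst ha; simp
      · have hb : (a == n) = false := by simp [ha]
        rw [List.find?_cons, hb]
        exact ih h

theorem pv_dedup_append_singleton (ms : List String) (n : String) :
    PySem.List.dedup (ms ++ [n]) =
      if n ∈ ms then PySem.List.dedup ms else PySem.List.dedup ms ++ [n] := by
  have h1 : PySem.List.dedup (ms ++ [n]) = PySem.Set.add (PySem.List.dedup ms) n := by
    simp [PySem.List.dedup_eq_ofList, PySem.Set.ofList_eq_foldl, List.foldl_append]
  rw [h1, PySem.Set.add]
  have h2 : PySem.Set.contains (PySem.List.dedup ms) n = decide (n ∈ ms) := by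
    cases hb : PySem.Set.contains (PySem.List.dedup ms) n with
    | true =>
      have := (PySem.List.mem_dedup ms n).1 ((PySem.Set.contains_iff _ n).1 hb)
      simp [this]
    | false =>
      have hnm : n ∉ ms := fun hm => by
        rw [(PySem.Set.contains_iff _ n).2 ((PySem.List.mem_dedup ms n).2 hm)] at hb
        cases hb
      simp [hnm]
  rw [h2]
  by_cases hn : n ∈ ms <;> simp [hn]

theorem pv_contains_of_items {nu : Type} (d : PySem.Dict String nu) (ms : List String) (g : String → nu)
    (h : d.items = (PySem.List.dedup ms).map (fun x => (x, g x))) (n : String) :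
    d.contains n = decide (n ∈ ms) := by
  have : d.contains n = ((PySem.List.dedup ms).map (fun x => (x, g x))).any (fun p => p.1 == n) := by
    rw [PySem.Dict.contains, h]
  rw [this, List.any_map]
  have : ((fun (p : String × nu) => p.1 == n) ∘ fun x => (x, g x)) = fun x => x == n := rfl
  rw [this, pv_any_beq]
  simp only [decide_eq_decide]
  exact PySem.List.mem_dedup ms n

-- items of A's counting fold, over the list of names
theorem pv_itemsA (ns : List String) :
    (ns.foldl (fun d n => d.insert n (d.getD n 0 + 1)) (PySem.Dict.empty : PySem.Dict String Int)).items
      = (PySem.List.dedup ns).map (fun x => (x, (ns.count x : Int))) := by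
  induction ns using List.reverseRecOn with
  | nil => rfl
  | append_singleton ms n ih =>
    rw [List.foldl_append, List.foldl_cons, List.foldl_nil]
    have hget : (ms.foldl (fun d n => d.insert n (d.getD n 0 + 1)) (PySem.Dict.empty : PySem.Dict String Int)).getD n 0 = (ms.count n : Int) := by
      rw [PySem.Dict.getD_foldl_insert_add_one, PySem.Dict.getD_empty, zero_add]
    have hcon := pv_contains_of_items _ ms (fun x => ((ms.count x : Int))) ih n
    rw [pv_dedup_append_singleton]
    by_cases hn : n ∈ ms
    · have hc : (ms.foldl (fun d n => d.insert n (d.getD n 0 + 1)) (PySem.Dict.empty : PySem.Dict String Int)).contains n = true := by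
        simp [hcon, hn]
      rw [PySem.Dict.items_insert_of_contains _ _ hc, ih, hget]
      rw [if_pos hn, List.map_map]
      apply List.map_congr_left
      intro x hx
      by_cases hxn : x = n
      · subst hxn
        simp [Function.comp, List.count_append]
      · have h1 : (x == n) = false := by simp [hxn]
        have h2 : List.count x [n] = 0 := by
          simp [show ¬ n = x from fun hh => hxn hh.symm]
        simp [Function.comp, h1, List.count_append, h2]
    · have hc : (ms.foldl (fun d n => d.insert n (d.getD n 0 + 1)) (PySem.Dict.empty : PySem.Dict String Int)).contains n = false := by
        simp [hcon, hn]
      rw [PySem.Dict.items_insert_of_not_contains _ _ hc, ih, hget]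
      rw [if_neg hn, List.map_append]
      congr 1
      · apply List.map_congr_left
        intro x hx
        have hxm : x ∈ ms := (PySem.List.mem_dedup ms x).1 hx
        have hxn : x ≠ n := fun h => hn (h ▸ hxm)
        have h2 : List.count x [n] = 0 := by simp [show ¬ n = x from fun hh => hxn hh.symm]
        simp [List.count_append, h2]
      · have h0 : List.count n ms = 0 := List.count_eq_zero_of_not_mem hn
        simp [List.count_append, h0]

-- the value stored for a key by B's fold, read off from its items (via pv_itemsB's IH)
theorem pv_getD_of_items (d : PySem.Dict String (Int × Bool)) (ms : List String) (g : String → Int × Bool)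
    (h : d.items = (PySem.List.dedup ms).map (fun x => (x, g x))) (n : String) :
    d.getD n (0, false) = if n ∈ ms then g n else (0, false) := by
  rw [PySem.Dict.getD, PySem.Dict.get?, h, List.find?_map]
  have hcomp : ((fun (p : String × (Int × Bool)) => p.1 == n) ∘ fun x => (x, g x)) = fun x => x == n := rfl
  rw [hcomp]
  by_cases hn : n ∈ ms
  · rw [pv_find?_beq_mem ((PySem.List.mem_dedup ms n).2 hn)]
    simp [hn]
  · have : (PySem.List.dedup ms).find? (fun x => x == n) = none := by
      rw [List.find?_eq_none]
      intro x hx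
      have hxm : x ∈ ms := (PySem.List.mem_dedup ms x).1 hx
      simp only [beq_iff_eq]
      exact fun hxn => hn (hxn ▸ hxm)
    rw [this]
    simp [hn]

-- items of B's one-pass fold, over the list of (name, is-basic) pairs
theorem pv_itemsB (ps : List (String × Bool)) :
    (ps.foldl (fun d q =>
        let p := d.getD q.1 (0, false)
        d.insert q.1 (p.1 + 1, p.2 || q.2)) (PySem.Dict.empty : PySem.Dict String (Int × Bool))).items
      = (PySem.List.dedup (ps.map Prod.fst)).map
          (fun x => (x, (((ps.map Prod.fst).count x : Int), ps.any (fun q => q.1 == x && q.2)))) := by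
  induction ps using List.reverseRecOn with
  | nil => rfl
  | append_singleton ms q ih =>
    rw [List.foldl_append, List.foldl_cons, List.foldl_nil]
    obtain ⟨n, b⟩ := q
    have hget := pv_getD_of_items _ (ms.map Prod.fst)
      (fun x => (((ms.map Prod.fst).count x : Int), ms.any (fun q => q.1 == x && q.2))) ih n
    have hcon := pv_contains_of_items _ (ms.map Prod.fst)
      (fun x => (((ms.map Prod.fst).count x : Int), ms.any (fun q => q.1 == x && q.2))) ih n
    have hmapfst : (ms ++ [(n, b)]).map Prod.fst = ms.map Prod.fst ++ [n] := by simp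
    rw [hmapfst, pv_dedup_append_singleton]
    by_cases hn : n ∈ ms.map Prod.fst
    · have hc : (ms.foldl (fun d q =>
          let p := d.getD q.1 (0, false)
          d.insert q.1 (p.1 + 1, p.2 || q.2)) (PySem.Dict.empty : PySem.Dict String (Int × Bool))).contains n = true := by
        simp [hcon, hn]
      rw [PySem.Dict.items_insert_of_contains _ _ hc, ih]
      rw [if_pos hn, List.map_map]
      apply List.map_congr_left
      intro x hx
      by_cases hxn : x = n
      · subst hxn
        simp only [Function.comp, beq_self_eq_true, if_pos, hget, if_pos hn]
        refine Prod.ext rfl (Prod.ext ?_ ?_)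
        · simp [List.count_append]
        · simp [List.any_append]
      · have h1 : (x == n) = false := by simp [hxn]
        have h2 : List.count x [n] = 0 := by simp [show ¬ n = x from fun hh => hxn hh.symm]
        have h3 : ((ms ++ [(n, b)]).any (fun q => q.1 == x && q.2)) = (ms.any (fun q => q.1 == x && q.2)) := by
          have hne : (((n, b) : String × Bool).1 == x) = false := beq_eq_false_iff_ne.mpr (fun h => hxn h.symm)
          simp [List.any_append, hne]
        simp [Function.comp, h1, List.count_append, h2, h3]
    · have hc : (ms.foldl (fun d q =>
          let p := d.getD q.1 (0, false)
          d.insert q.1 (p.1 + 1, p.2 || q.2)) (PySem.Dict.empty : PySem.Dict String (Int × Bool))).contains n = false := by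
        simp [hcon, hn]
      rw [PySem.Dict.items_insert_of_not_contains _ _ hc, ih]
      rw [if_neg hn, List.map_append]
      congr 1
      · apply List.map_congr_left
        intro x hx
        have hxm : x ∈ ms.map Prod.fst := (PySem.List.mem_dedup _ x).1 hx
        have hxn : x ≠ n := fun h => hn (h ▸ hxm)
        have h2 : List.count x [n] = 0 := by simp [show ¬ n = x from fun hh => hxn hh.symm]
        have h3 : ((ms ++ [(n, b)]).any (fun q => q.1 == x && q.2)) = (ms.any (fun q => q.1 == x && q.2)) := by
          have hne : (((n, b) : String × Bool).1 == x) = false := beq_eq_false_iff_ne.mpr (fun h => hxn h.symm)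
          simp [List.any_append, hne]
        simp [List.count_append, h2, h3]
      · have h0 : List.count n (ms.map Prod.fst) = 0 := List.count_eq_zero_of_not_mem hn
        have h4 : (ms.any (fun q => q.1 == n && q.2)) = false := by
          rw [List.any_eq_false]
          intro q hq
          have : (q.1 == n) = false := by
            simp only [beq_eq_false_iff_ne, ne_eq]
            exact fun h => hn (h ▸ List.mem_map_of_mem hq)
          simp [this]
        simp only [hget, if_neg hn, List.map_cons, List.map_nil, List.count_append, h0,
          List.any_append, h4]
        simp

-- the two check passes agree entry by entry
theorem pv_scan_eq (deck : List (List (String × String))) (L : List String) (cnt : String → Int) :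
    pvScanA deck (L.map fun n => (n, cnt n))
      = pvScanB (L.map fun n => (n, (cnt n, deck.any (fun card => pvName card == n && pvBasic card)))) := by
  induction L with
  | nil => rfl
  | cons a t ih => simp only [List.map_cons, pvScanA, pvScanB, ih]

-- ===== VERDICT (by name: the statement is the Claim_ definition above) =====
theorem validate_deck_spec : Claim_equal_validate_deck := by
  intro commander deck _ _
  unfold Spec_validate_deck validate_deck validate_deck_alt
  have main :
      pvScanA deck (deck.foldl (fun d card => d.insert (pvName card) (d.getD (pvName card) 0 + 1)) (PySem.Dict.empty : PySem.Dict String Int)).items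
        = pvScanB (pvBuildB deck).items := by
    have hA : (deck.foldl (fun d card => d.insert (pvName card) (d.getD (pvName card) 0 + 1)) (PySem.Dict.empty : PySem.Dict String Int))
        = ((deck.map pvName).foldl (fun d n => d.insert n (d.getD n 0 + 1)) PySem.Dict.empty) := by
      rw [List.foldl_map]
    have hB : pvBuildB deck
        = ((deck.map (fun c => (pvName c, pvBasic c))).foldl (fun d q =>
            let p := d.getD q.1 (0, false)
            d.insert q.1 (p.1 + 1, p.2 || q.2)) PySem.Dict.empty) := by
      rw [pvBuildB, List.foldl_map]
    have hfst : (deck.map (fun c => (pvName c, pvBasic c))).map Prod.fst = deck.map pvName := by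
      simp [List.map_map, Function.comp]
    rw [hA, hB, pv_itemsA, pv_itemsB, hfst]
    refine (pv_scan_eq deck (PySem.List.dedup (deck.map pvName))
      (fun x => ((deck.map pvName).count x : Int))).trans ?_
    apply congrArg pvScanB
    apply List.map_congr_left
    intro x _
    have hany : (deck.map (fun c => (pvName c, pvBasic c))).any (fun q => q.1 == x && q.2)
        = deck.any (fun card => pvName card == x && pvBasic card) := by
      rw [List.any_map]; rfl
    rw [hany]
  cases commander with
  | none => rfl
  | some s =>
    by_cases h1 : (s == "") = true
    · simp [h1]
    · by_cases h2 : deck.length = 99 <;> simp [h1, h2, main]
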